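-- pv_equiv track=rewrite | github.com/AnqurEnayet/robolab-project-g35 | src/hamming_code.py | __convert_to_g
-- ===== SOURCE A (Python) =====
-- from typing import List, Tuple, Union
--
-- def __convert_to_g(gns: List):
--     """ Converts a non-systematic generator matrix into a systematic one. """
--     m = [row[:] for row in gns]
--     rows = len(m)
--
--     # Forward Elimination (Row Echelon)
--     for i in range(rows):
--         if m[i][i] == 0:
--             # Find pivot
--             for j in range(i + 1, rows):
--                 if m[j][i] == 1:
--                     m[i], m[j] = m[j], m[i]
--                     break
--
--         # Eliminate below
--         for j in range(i + 1, rows):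
--             if m[j][i] == 1:
--                 m[j] = [x ^ y for x, y in zip(m[j], m[i])]
--
--     # Backward Elimination (Reduced Row Echelon)
--     for i in range(rows - 1, -1, -1):
--         for j in range(i - 1, -1, -1):
--             if m[j][i] == 1:
--                 m[j] = [x ^ y for x, y in zip(m[j], m[i])]
--
--     return m
-- ===== SOURCE B (Python) =====
-- def __convert_to_g(gns):
--     """ Converts a non-systematic generator matrix into a systematic one.
--     Different decomposition: instead of an index-addressed matrix mutated by
--     two in-place passes, phase 1 consumes the rows head-first, splitting the
--     problem into (finished echelon rows, shrinking tail); phase 2 produces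
--     each final row by memoized top-down back-substitution (each final row is
--     computed once from the final rows below it). """
--     def xor(a, b):
--         return [x ^ y for x, y in zip(a, b)]
--
--     # Phase 1: streaming echelon construction over a shrinking tail
--     ech, rest = [], [row[:] for row in gns]
--     for i in range(len(gns)):
--         if rest[0][i] == 0:
--             for k in range(1, len(rest)):
--                 if rest[k][i] == 1:
--                     rest[0], rest[k] = rest[k], rest[0]
--                     break
--         piv, rest = rest[0], rest[1:]
--         rest = [xor(row, piv) if row[i] == 1 else row for row in rest]
--         ech.append(piv)
--
--     # Phase 2: memoized top-down back-substitution
--     memo = {}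
--     def final(j):
--         if j not in memo:
--             row = ech[j]
--             for k in range(len(ech) - 1, j, -1):
--                 if row[k] == 1:
--                     row = xor(row, final(k))
--             memo[j] = row
--         return memo[j]
--     for j in range(len(gns) - 1, -1, -1):   # fill bottom-up: keeps recursion shallow
--         final(j)
--     return [final(j) for j in range(len(gns))]
-- ===== Notes on version B (the rewrite author's own statement) =====
-- stated objective: alternative
-- what changed: A's two in-place index-addressed passes over one mutable matrix are replaced by a different decomposition: phase 1 consumes the rows head-first, splitting the state into (finished echelon rows, shrinking tail) with no index-based row access, and phase 2 replaces the in-place backward double loop by a memoized top-down back-substitution (dynamic programming: each final row is computed once from the final rows below it, instead of rows being repeatedly mutated while still non-final); the return value is proved identical on every input A returns on.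
import Mathlib
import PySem

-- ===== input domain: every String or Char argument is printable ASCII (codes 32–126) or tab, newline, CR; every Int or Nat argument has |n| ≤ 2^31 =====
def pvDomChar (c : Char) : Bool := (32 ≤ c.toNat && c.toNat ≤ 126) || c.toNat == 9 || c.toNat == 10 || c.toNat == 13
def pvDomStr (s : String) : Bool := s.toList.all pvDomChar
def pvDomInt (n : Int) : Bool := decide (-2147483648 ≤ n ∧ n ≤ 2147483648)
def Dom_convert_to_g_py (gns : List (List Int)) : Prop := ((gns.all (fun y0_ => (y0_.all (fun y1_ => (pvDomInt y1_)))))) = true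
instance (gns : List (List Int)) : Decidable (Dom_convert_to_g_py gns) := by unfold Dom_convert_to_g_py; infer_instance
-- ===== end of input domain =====

-- B replaces A's two in-place index-addressed passes by a head-first streaming echelon
-- construction over a shrinking tail plus a memoized top-down back-substitution that builds
-- each final row once (objective: alternative decomposition, same cost).
-- Indexing m[j][i] is ported with List.getD (exact under Pre_: every index stays in range there).

-- ===== PORT A =====
-- [x ^ y for x, y in zip(a, b)]  (PySem.Int.bxor is Python-exact ^ on Int)
def pyRowXorA (a b : List Int) : List Int := List.zipWith PySem.Int.bxor a b

-- the pivot-search loop with break: first j with m[j][i]==1 swaps rows i and j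
def pivotSearchA (m : List (List Int)) (i : Nat) : List Nat → List (List Int)
  | [] => m
  | j :: js =>
    if (m.getD j []).getD i 0 == 1 then (m.set i (m.getD j [])).set j (m.getD i [])
    else pivotSearchA m i js

-- body of both of A's elimination loops: 'if m[j][i] == 1: m[j] = [x ^ y for ...]'
def elimStepA (i : Nat) (acc : List (List Int)) (j : Nat) : List (List Int) :=
  if (acc.getD j []).getD i 0 == 1 then acc.set j (pyRowXorA (acc.getD j []) (acc.getD i []))
  else acc

-- one iteration of A's forward loop (pivot fix, then eliminate below)
def fwdStepA (rows : Nat) (m : List (List Int)) (i : Nat) : List (List Int) :=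
  let m1 := if (m.getD i []).getD i 0 == 0 then pivotSearchA m i (List.range' (i+1) (rows - (i+1))) else m
  (List.range' (i+1) (rows - (i+1))).foldl (elimStepA i) m1

def convert_to_g_py (gns : List (List Int)) : List (List Int) :=
  let rows := gns.length
  let m := (List.range rows).foldl (fwdStepA rows) gns
  -- backward: for i in range(rows-1,-1,-1): for j in range(i-1,-1,-1): ...
  ((List.range rows).reverse).foldl (fun acc i => ((List.range i).reverse).foldl (elimStepA i) acc) m

-- ===== PORT B =====
def bXor (a b : List Int) : List Int := List.zipWith PySem.Int.bxor a b

-- phase-1 swap loop with break: bring the first tail row with a 1 in column i to the front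
def bSwap (rest : List (List Int)) (i : Nat) : List Nat → List (List Int)
  | [] => rest
  | k :: ks =>
    if (rest.getD k []).getD i 0 == 1 then (rest.set 0 (rest.getD k [])).set k (rest.getD 0 [])
    else bSwap rest i ks

-- phase-1 body: split off the pivot row, clear column i in the remaining tail
def bFwdStep (er : List (List Int) × List (List Int)) (i : Nat) :
    List (List Int) × List (List Int) :=
  let rest1 := if ((er.2.getD 0 []).getD i 0 == 0)
    then bSwap er.2 i (List.range' 1 (er.2.length - 1)) else er.2
  let piv := rest1.getD 0 []
  (er.1 ++ [piv], (rest1.drop 1).map (fun row => if row.getD i 0 == 1 then bXor row piv else row))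

-- phase-2: the memoized recursion final(j), fuel = number of rows still below
def bFinal (ech : List (List Int)) (n : Nat) : Nat → Nat → List Int
  | 0, _ => []
  | fuel+1, j =>
    ((List.range' (j+1) (n - (j+1))).reverse).foldl
      (fun row k => if row.getD k 0 == 1 then bXor row (bFinal ech n fuel k) else row)
      (ech.getD j [])

def convert_to_g_py_alt (gns : List (List Int)) : List (List Int) :=
  let n := gns.length
  let ech := ((List.range n).foldl bFwdStep ([], gns)).1
  (List.range n).map (fun j => bFinal ech n (n - j) j)

-- ===== PRECONDITION & SPEC =====
-- Pre_ excludes exactly the inputs on which Python A raises IndexError: some row shorter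
-- than the number of rows makes an m[i][i] / m[j][i] access go out of range.
def Pre_convert_to_g_py (gns : List (List Int)) : Prop :=
  ∀ row ∈ gns, gns.length ≤ row.length
instance (gns : List (List Int)) : Decidable (Pre_convert_to_g_py gns) := by
  unfold Pre_convert_to_g_py; infer_instance

def pvWitness_convert_to_g_py : List (List Int) := [[1, 1, 0], [0, 1, 1]]

def Spec_convert_to_g_py (gns : List (List Int)) (out : List (List Int)) : Prop := out = convert_to_g_py_alt gns
instance (gns : List (List Int)) (out : List (List Int)) : Decidable (Spec_convert_to_g_py gns out) := by unfold Spec_convert_to_g_py; infer_instance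

-- ===== CLAIM (what is proved, stated in full; the proofs are below) =====
def Claim_equal_convert_to_g_py : Prop := ∀ (gns : List (List Int)), Dom_convert_to_g_py gns → Pre_convert_to_g_py gns → Spec_convert_to_g_py gns (convert_to_g_py gns)

-- ===== LEMMAS AND PROOFS =====

-- ---- getD/set helpers ----
theorem getD_set_ne (m : List (List Int)) (j k : Nat) (v : List Int) (h : k ≠ j) :
    (m.set j v).getD k [] = m.getD k [] := by
  simp [List.getD, List.getElem?_set_ne (Ne.symm h)]

theorem getD_in (m : List (List Int)) (k : Nat) (h : k < m.length) : m.getD k [] = m[k] := by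
  simp [List.getD, List.getElem?_eq_getElem h]

theorem getD_drop (m : List (List Int)) (i k : Nat) :
    (m.drop i).getD k [] = m.getD (i + k) [] := by
  simp [List.getD, List.getElem?_drop]

-- ---- A-port loop characterisations ----
theorem pivotSearchA_eq_find (m : List (List Int)) (i : Nat) (js : List Nat) :
    pivotSearchA m i js =
      (match js.find? (fun j => (m.getD j []).getD i 0 == 1) with
        | none => m
        | some k => (m.set i (m.getD k [])).set k (m.getD i [])) := by
  induction js with
  | nil => simp [pivotSearchA]
  | cons a js ih =>
    simp only [pivotSearchA, List.find?_cons]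
    cases h : ((m.getD a []).getD i 0 == 1) with
    | true => simp
    | false => simp [ih]

theorem length_elimStepA (i : Nat) (acc : List (List Int)) (j : Nat) :
    (elimStepA i acc j).length = acc.length := by
  unfold elimStepA; split <;> simp

theorem getD_elimStepA_ne (i : Nat) (acc : List (List Int)) (j k : Nat) (h : k ≠ j) :
    (elimStepA i acc j).getD k [] = acc.getD k [] := by
  unfold elimStepA
  split <;> simp [List.getD, List.getElem?_set_ne (Ne.symm h)]

-- per-index characterisation of an elimStepA fold over a Nodup list avoiding i
theorem inner_getD (i : Nat) :
    ∀ (js : List Nat) (m : List (List Int)), js.Nodup → i ∉ js → ∀ (k : Nat),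
    (js.foldl (elimStepA i) m).getD k [] =
      if k ∈ js then
        (if (m.getD k []).getD i 0 == 1 then pyRowXorA (m.getD k []) (m.getD i []) else m.getD k [])
      else m.getD k [] := by
  intro js
  induction js with
  | nil => intro m _ _ k; rw [List.foldl_nil, if_neg (by simp)]
  | cons a js ih =>
    intro m hnd hni k
    have hnd' : js.Nodup := (List.nodup_cons.mp hnd).2
    have hana : a ∉ js := (List.nodup_cons.mp hnd).1
    have hia : i ≠ a := fun h => hni (by simp [h])
    have hinj : i ∉ js := fun h => hni (by simp [h])
    simp only [List.foldl_cons]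
    rw [ih (elimStepA i m a) hnd' hinj k]
    have hgi : (elimStepA i m a).getD i [] = m.getD i [] := getD_elimStepA_ne i m a i hia
    have hga : (elimStepA i m a).getD a [] =
        (if (m.getD a []).getD i 0 == 1 then pyRowXorA (m.getD a []) (m.getD i []) else m.getD a []) := by
      unfold elimStepA
      split
      · rename_i hc
        by_cases hal : a < m.length
        · simp [List.getD, List.getElem?_set_self hal]
        · have hnil : m.getD a [] = [] := by
            simp [List.getD, List.getElem?_eq_none (by omega : m.length ≤ a)]
          rw [hnil] at hc
          simp at hc
      · rename_i hc
        simp only [Bool.not_eq_true] at hc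
        simp
    by_cases hk : k ∈ js
    · have hka : k ≠ a := fun h => hana (h ▸ hk)
      rw [if_pos hk, getD_elimStepA_ne i m a k hka, hgi]
      simp [List.mem_cons, hk]
    · rw [if_neg hk]
      by_cases hka : k = a
      · subst hka
        rw [hga]
        simp
      · rw [getD_elimStepA_ne i m a k hka]
        simp [List.mem_cons, hka, hk]

theorem inner_length (i : Nat) :
    ∀ (js : List Nat) (m : List (List Int)), (js.foldl (elimStepA i) m).length = m.length := by
  intro js
  induction js with
  | nil => intro m; rfl
  | cons a js ih => intro m; simp only [List.foldl_cons]; rw [ih, length_elimStepA]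

-- A's backward pass as a countdown recursion
def bwdA (rows : Nat) : List (List Int) → Nat → List (List Int)
  | m, 0 => m
  | m, i+1 => bwdA rows (((List.range i).reverse).foldl (elimStepA i) m) i

theorem bwdA_eq_foldl (rows : Nat) :
    ∀ (n : Nat) (m : List (List Int)),
    ((List.range n).reverse).foldl (fun acc i => ((List.range i).reverse).foldl (elimStepA i) acc) m
      = bwdA rows m n := by
  intro n
  induction n with
  | zero => intro m; rfl
  | succ n ih =>
    intro m
    rw [List.range_succ, List.reverse_append]
    simp only [List.reverse_singleton, List.singleton_append, List.foldl_cons]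
    exact ih _

-- ---- the pivot-fix step of A, named for the proofs ----
def pfA (rows : Nat) (m : List (List Int)) (i : Nat) : List (List Int) :=
  if (m.getD i []).getD i 0 == 0 then
    match (List.range' (i+1) (rows - (i+1))).find? (fun j => (m.getD j []).getD i 0 == 1) with
    | none => m
    | some k => (m.set i (m.getD k [])).set k (m.getD i [])
  else m

theorem fwdStepA_pf (rows : Nat) (m : List (List Int)) (i : Nat) :
    fwdStepA rows m i = (List.range' (i+1) (rows - (i+1))).foldl (elimStepA i) (pfA rows m i) := by
  unfold fwdStepA pfA
  rw [pivotSearchA_eq_find]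

theorem pfA_length (rows : Nat) (m : List (List Int)) (i : Nat) :
    (pfA rows m i).length = m.length := by
  unfold pfA; split
  · split <;> simp
  · rfl

-- ---- forward iteration states ----
def FA (g : List (List Int)) : Nat → List (List Int)
  | 0 => g
  | i+1 => fwdStepA g.length (FA g i) i

theorem FA_foldl (g : List (List Int)) (n : Nat) :
    (List.range n).foldl (fwdStepA g.length) g = FA g n := by
  induction n with
  | zero => rfl
  | succ n ih => rw [List.range_succ, List.foldl_append, ih]; rfl

theorem FA_length (g : List (List Int)) : ∀ i, (FA g i).length = g.length := by
  intro i
  induction i with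
  | zero => rfl
  | succ i ih =>
    show (fwdStepA g.length (FA g i) i).length = g.length
    rw [fwdStepA_pf, inner_length, pfA_length]
    exact ih

-- B's streaming state after i steps
def SB (g : List (List Int)) (i : Nat) : List (List Int) × List (List Int) :=
  (List.range i).foldl bFwdStep ([], g)

theorem SB_foldl (g : List (List Int)) (n : Nat) :
    (List.range n).foldl bFwdStep ([], g) = SB g n := rfl

theorem SB_succ (g : List (List Int)) (i : Nat) :
    SB g (i+1) = bFwdStep (SB g i) i := by
  unfold SB
  rw [List.range_succ, List.foldl_append]
  rfl

theorem bSwap_eq_find (rest : List (List Int)) (i : Nat) (ks : List Nat) :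
    bSwap rest i ks =
      (match ks.find? (fun k => (rest.getD k []).getD i 0 == 1) with
        | none => rest
        | some k => (rest.set 0 (rest.getD k [])).set k (rest.getD 0 [])) := by
  induction ks with
  | nil => simp [bSwap]
  | cons a ks ih =>
    simp only [bSwap, List.find?_cons]
    cases h : ((rest.getD a []).getD i 0 == 1) with
    | true => simp
    | false => simp [ih]

theorem find?_congr_nat (p q : Nat → Bool) :
    ∀ (l : List Nat), (∀ x ∈ l, p x = q x) → l.find? p = l.find? q := by
  intro l
  induction l with
  | nil => intro _; rfl
  | cons a l ih =>
    intro h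
    rw [List.find?_cons, List.find?_cons, h a (by simp)]
    split <;> first | rfl | exact ih (fun x hx => h x (by simp [hx]))

theorem pfA_getD_lt (rows : Nat) (m : List (List Int)) (i j : Nat) (hj : j < i) :
    (pfA rows m i).getD j [] = m.getD j [] := by
  unfold pfA; split
  · split
    · rfl
    · rename_i k hk
      have hmem := List.mem_of_find?_eq_some hk
      have hk1 := (List.mem_range'_1.mp hmem).1
      rw [getD_set_ne _ _ _ _ (by omega), getD_set_ne _ _ _ _ (by omega)]
  · rfl

-- the pivot fix seen through the (prefix, tail) split
theorem pfA_split (g : List (List Int)) (i : Nat) (hir : i < g.length) :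
    (pfA g.length (FA g i) i).take i = (FA g i).take i ∧
    (pfA g.length (FA g i) i).drop i =
      (if (((FA g i).drop i).getD 0 []).getD i 0 == 0
        then bSwap ((FA g i).drop i) i (List.range' 1 (((FA g i).drop i).length - 1))
        else (FA g i).drop i) := by
  set r := g.length with hr
  set A := FA g i with hA
  have hAl : A.length = r := FA_length g i
  set da := A.drop i with hda
  have hdal : da.length = r - i := by rw [hda, List.length_drop, hAl]
  have hgd : ∀ k, da.getD k [] = A.getD (i + k) [] := fun k => getD_drop A i k
  have hcond : ((da.getD 0 []).getD i 0 == 0) = ((A.getD i []).getD i 0 == 0) := by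
    rw [hgd 0, Nat.add_zero]
  have hm : da.length - 1 = r - (i+1) := by omega
  have hfind :
      (List.range' 1 (r - (i+1))).find? (fun k => (da.getD k []).getD i 0 == 1)
        = Option.map (fun t => 1 + t)
            ((List.range (r - (i+1))).find?
              (fun t => ((A.getD (i+1+t) []).getD i 0 == 1))) := by
    rw [List.range'_eq_map_range, List.find?_map]
    congr 1
    apply find?_congr_nat
    intro t _
    show ((da.getD (1+t) []).getD i 0 == 1) = _
    rw [hgd (1+t), show i + (1 + t) = i + 1 + t from by omega]
  have hfindA :
      (List.range' (i+1) (r - (i+1))).find? (fun j => (A.getD j []).getD i 0 == 1)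
        = Option.map (fun t => i + 1 + t)
            ((List.range (r - (i+1))).find?
              (fun t => ((A.getD (i+1+t) []).getD i 0 == 1))) := by
    rw [List.range'_eq_map_range, List.find?_map]
    rfl
  unfold pfA
  rw [bSwap_eq_find da i (List.range' 1 (da.length - 1)), hcond, hm, hfind, hfindA]
  by_cases hc : (((A.getD i []).getD i 0 == 0) = true)
  · rw [if_pos hc, if_pos hc]
    cases ho : (List.range (r - (i+1))).find? (fun t => ((A.getD (i+1+t) []).getD i 0 == 1)) with
    | none => exact ⟨rfl, rfl⟩
    | some t =>
      have htm : t < r - (i+1) := List.mem_range.mp (List.mem_of_find?_eq_some ho)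
      simp only [Option.map_some]
      constructor
      · rw [List.take_set, List.take_set]
        rw [List.set_eq_of_length_le (by rw [List.length_set, List.length_take]; omega),
          List.set_eq_of_length_le (by rw [List.length_take]; omega)]
      · rw [List.drop_set, if_neg (by omega), List.drop_set, if_neg (by omega)]
        rw [show i - i = 0 from by omega, show i + 1 + t - i = 1 + t from by omega]
        rw [← hda, hgd (1+t), hgd 0,
          show i + (1 + t) = i + 1 + t from by omega]
        norm_num
  · rw [if_neg hc, if_neg hc]
    exact ⟨rfl, rfl⟩

-- the streaming invariant: finished rows = processed prefix of A's state, tail = the rest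
theorem bXor_eq (a b : List Int) : bXor a b = pyRowXorA a b := rfl

theorem stream_inv (g : List (List Int)) : ∀ i, i ≤ g.length →
    SB g i = ((FA g i).take i, (FA g i).drop i) := by
  intro i
  induction i with
  | zero => intro _; simp [SB, FA]
  | succ i ih =>
    intro hle
    have hir : i < g.length := by omega
    rw [SB_succ, ih (by omega)]
    set r := g.length with hr
    set A := FA g i with hA
    have hAl : A.length = r := FA_length g i
    obtain ⟨hkeep, hrest⟩ := pfA_split g i hir
    set pa := pfA r A i with hpa
    have hpal : pa.length = r := by rw [hpa, pfA_length, hAl]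
    set js := List.range' (i+1) (r - (i+1)) with hjs
    have hnd : js.Nodup := by rw [hjs]; exact List.nodup_range'
    have hni : i ∉ js := by rw [hjs, List.mem_range'_1]; omega
    have hjsm : ∀ t, t ∈ js ↔ (i+1 ≤ t ∧ t < r) := by
      intro t; rw [hjs, List.mem_range'_1]; omega
    have hE' : ∀ k, (FA g (i+1)).getD k [] =
        (if k ∈ js then
          (if (pa.getD k []).getD i 0 == 1 then pyRowXorA (pa.getD k []) (pa.getD i [])
           else pa.getD k [])
         else pa.getD k []) := by
      intro k
      rw [show FA g (i+1) = fwdStepA r A i from rfl, fwdStepA_pf r A i]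
      exact inner_getD i js pa hnd hni k
    have hElen : (FA g (i+1)).length = r := by
      rw [show FA g (i+1) = fwdStepA r A i from rfl, fwdStepA_pf r A i, inner_length]
      exact hpal
    unfold bFwdStep
    dsimp only
    rw [← hrest, List.drop_drop, getD_drop pa i 0, Nat.add_zero]
    refine Prod.ext ?_ ?_
    · -- prefix side
      dsimp only
      apply List.ext_getElem
      · simp only [List.length_append, List.length_take, List.length_cons, List.length_nil]
        omega
      · intro k h1 h2
        have hk : k < i + 1 := by
          simp only [List.length_take] at h2
          omega
        have hkr : k < r := by omega
        rw [List.getElem_take, ← getD_in (FA g (i+1)) k (by omega), hE' k,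
          if_neg (by rw [hjsm]; omega)]
        by_cases hki : k = i
        · subst hki
          rw [List.getElem_append_right (by simp only [List.length_take]; omega)]
          simp [List.length_take, hAl, min_eq_left (le_of_lt hir)]
        · have hklt : k < i := by omega
          rw [List.getElem_append_left (by simp only [List.length_take]; omega)]
          rw [List.getElem_take, hpa, pfA_getD_lt r A i k hklt, getD_in A k (by omega)]
    · -- tail side
      dsimp only
      apply List.ext_getElem
      · simp only [List.length_map, List.length_drop]
        omega
      · intro t h1 h2
        have htb : t < r - (i+1) := by
          simp only [List.length_map, List.length_drop] at h1
          omega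
        rw [List.getElem_map, List.getElem_drop, List.getElem_drop]
        rw [← getD_in pa (i+1+t) (by omega), ← getD_in (FA g (i+1)) (i+1+t) (by omega)]
        rw [hE' (i+1+t), if_pos ((hjsm _).mpr ⟨by omega, by omega⟩), bXor_eq]

theorem bFinal_succ (ech : List (List Int)) (n fuel j : Nat) :
    bFinal ech n (fuel+1) j =
      ((List.range' (j+1) (n - (j+1))).reverse).foldl
        (fun row k => if row.getD k 0 == 1 then bXor row (bFinal ech n fuel k) else row)
        (ech.getD j []) := rfl

def Fin_ (ech : List (List Int)) (n j : Nat) : List Int := bFinal ech n (n - j) j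

theorem bFinal_fuel (ech : List (List Int)) (n : Nat) :
    ∀ fuel j, j < n → n - j ≤ fuel → bFinal ech n fuel j = Fin_ ech n j := by
  intro fuel
  induction fuel using Nat.strong_induction_on with
  | _ fuel ih =>
    intro j hj hle
    match fuel, hle with
    | 0, hle => exact absurd hle (by omega)
    | fuel+1, hle =>
      have h1 : bFinal ech n (fuel+1) j =
          ((List.range' (j+1) (n - (j+1))).reverse).foldl
            (fun row k => if row.getD k 0 == 1 then bXor row (Fin_ ech n k) else row)
            (ech.getD j []) := by
        rw [bFinal_succ]
        apply PySem.List.foldl_congr_mem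
        intro acc k hk
        have hkr := List.mem_range'_1.mp (List.mem_reverse.mp hk)
        rw [ih fuel (by omega) k (by omega) (by omega)]
      have hnj : n - j = (n - j - 1) + 1 := by omega
      have h2 : Fin_ ech n j =
          ((List.range' (j+1) (n - (j+1))).reverse).foldl
            (fun row k => if row.getD k 0 == 1 then bXor row (Fin_ ech n k) else row)
            (ech.getD j []) := by
        show bFinal ech n (n - j) j = _
        rw [hnj, bFinal_succ]
        apply PySem.List.foldl_congr_mem
        intro acc k hk
        have hkr := List.mem_range'_1.mp (List.mem_reverse.mp hk)
        rw [ih (n - j - 1) (by omega) k (by omega) (by omega)]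
      rw [h1, h2]

theorem Fin_eq (ech : List (List Int)) (n j : Nat) (hj : j < n) :
    Fin_ ech n j =
      ((List.range' (j+1) (n - (j+1))).reverse).foldl
        (fun row k => if row.getD k 0 == 1 then bXor row (Fin_ ech n k) else row)
        (ech.getD j []) := by
  have hnj : n - j = (n - j - 1) + 1 := by omega
  show bFinal ech n (n - j) j = _
  rw [hnj, bFinal_succ]
  apply PySem.List.foldl_congr_mem
  intro acc k hk
  have hkr := List.mem_range'_1.mp (List.mem_reverse.mp hk)
  rw [bFinal_fuel ech n (n - j - 1) k (by omega) (by omega)]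

-- A's backward pass lands on the memoised rows
theorem bwd_inv (F : List (List Int)) (r : Nat) (hF : F.length = r) :
    ∀ n (M : List (List Int)), n ≤ r → M.length = r →
      (∀ j, n ≤ j → j < r → M.getD j [] = Fin_ F r j) →
      (∀ j, j < n → M.getD j [] =
        ((List.range' n (r - n)).reverse).foldl
          (fun row k => if row.getD k 0 == 1 then bXor row (Fin_ F r k) else row)
          (F.getD j [])) →
      ∀ j, j < r → (bwdA r M n).getD j [] = Fin_ F r j := by
  intro n
  induction n with
  | zero =>
    intro M _ _ h1 _ j hj
    exact h1 j (by omega) hj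
  | succ n ih =>
    intro M hn hMl h1 h2 j hj
    have hnr : n < r := by omega
    set js' := (List.range n).reverse with hjs'
    have hnd' : js'.Nodup := by rw [hjs']; exact List.nodup_reverse.mpr List.nodup_range
    have hni' : n ∉ js' := by rw [hjs']; simp
    have hmem' : ∀ t, t ∈ js' ↔ t < n := by intro t; rw [hjs']; simp
    set M' := js'.foldl (elimStepA n) M with hM'
    have hM'l : M'.length = r := by rw [hM', inner_length]; exact hMl
    have hMn : M.getD n [] = Fin_ F r n := by
      rw [h2 n (by omega), ← Fin_eq F r n hnr]
    have h1' : ∀ j, n ≤ j → j < r → M'.getD j [] = Fin_ F r j := by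
      intro t ht htr
      rw [hM', inner_getD n js' M hnd' hni' t, if_neg (by rw [hmem']; omega)]
      by_cases htn : t = n
      · rw [htn]; exact hMn
      · exact h1 t (by omega) htr
    have h2' : ∀ t, t < n → M'.getD t [] =
        ((List.range' n (r - n)).reverse).foldl
          (fun row k => if row.getD k 0 == 1 then bXor row (Fin_ F r k) else row)
          (F.getD t []) := by
      intro t ht
      rw [hM', inner_getD n js' M hnd' hni' t, if_pos ((hmem' t).mpr ht), hMn,
        h2 t (by omega)]
      rw [show List.range' n (r - n) = n :: List.range' (n+1) (r - (n+1)) from by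
        rw [show r - n = (r - (n+1)) + 1 from by omega, List.range'_succ]]
      rw [List.reverse_cons, List.foldl_append]
      rfl
    show (bwdA r M' n).getD j [] = Fin_ F r j
    exact ih M' (by omega) hM'l h1' h2' j hj

theorem bwdA_length (r : Nat) : ∀ n (M : List (List Int)), (bwdA r M n).length = M.length := by
  intro n
  induction n with
  | zero => intro M; rfl
  | succ n ih =>
    intro M
    show (bwdA r (((List.range n).reverse).foldl (elimStepA n) M) n).length = M.length
    rw [ih, inner_length]

-- ===== VERDICT (by name: the statement is the Claim_ definition above) =====
theorem convert_to_g_py_spec : Claim_equal_convert_to_g_py := by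
  intro gns _ _
  unfold Spec_convert_to_g_py
  set r := gns.length with hr
  set F := FA gns r
  have hFl : F.length = r := FA_length gns r
  have hAeq : convert_to_g_py gns = bwdA r F r := by
    show ((List.range r).reverse).foldl
        (fun acc i => ((List.range i).reverse).foldl (elimStepA i) acc)
        ((List.range r).foldl (fwdStepA r) gns) = bwdA r F r
    rw [FA_foldl, bwdA_eq_foldl]
  have hech : ((List.range r).foldl bFwdStep ([], gns)).1 = F := by
    rw [SB_foldl, stream_inv gns r (le_refl r)]
    dsimp only
    rw [List.take_of_length_le (le_of_eq hFl)]
  have hBeq : convert_to_g_py_alt gns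
      = (List.range r).map (fun j => bFinal F r (r - j) j) := by
    show (List.range r).map
        (fun j => bFinal ((List.range r).foldl bFwdStep ([], gns)).1 r (r - j) j) = _
    rw [hech]
  rw [hAeq, hBeq]
  apply List.ext_getElem
  · rw [bwdA_length, hFl, List.length_map, List.length_range]
  · intro k h1 h2
    have hk : k < r := by simpa using h2
    rw [List.getElem_map, List.getElem_range]
    rw [← getD_in (bwdA r F r) k (by rw [bwdA_length, hFl]; exact hk)]
    exact bwd_inv F r hFl r F (le_refl r) hFl
      (fun j hj hjr => absurd hj (by omega))
      (fun j hj => by simp) k hk
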